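-- pv_equiv track=rewrite | github.com/ruijorgenobre/deepMirCut | other/ensemble_tests/Scripts/graph_deltas_histogram.py | get_cuts_from_line
-- ===== SOURCE A (Python) =====
-- def get_cuts_from_line(line):
--     drosha5p = -1
--     dicer5p = -1
--     dicer3p = -1
--     drosha3p = -1
--     linechars = line.split(",")
--     for i in range(0,len(linechars)):
--         cut_positions = {}
--         if linechars[i] == "DR5":
--             drosha5p = i
--         if linechars[i] == "DC5":
--             dicer5p = i
--         if linechars[i] == "DC3":
--             dicer3p = i
--         if linechars[i] == "DR3":
--             drosha3p = i
--     return drosha5p,dicer5p,dicer3p,drosha3p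
-- ===== SOURCE B (Python) =====
-- def _last_index(labels, target):
--     idx = -1
--     for i, s in enumerate(labels):
--         if s == target:
--             idx = i
--     return idx
--
-- def get_cuts_from_line(line):
--     labels = line.split(",")
--     return (_last_index(labels, "DR5"),
--             _last_index(labels, "DC5"),
--             _last_index(labels, "DC3"),
--             _last_index(labels, "DR3"))
-- ===== Notes on version B (the rewrite author's own statement) =====
-- stated objective: simpler
-- what changed: Replaces the single fused index loop mutating four variables with a small last-index helper applied once per label, returning the 4-tuple directly.
import Mathlib
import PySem

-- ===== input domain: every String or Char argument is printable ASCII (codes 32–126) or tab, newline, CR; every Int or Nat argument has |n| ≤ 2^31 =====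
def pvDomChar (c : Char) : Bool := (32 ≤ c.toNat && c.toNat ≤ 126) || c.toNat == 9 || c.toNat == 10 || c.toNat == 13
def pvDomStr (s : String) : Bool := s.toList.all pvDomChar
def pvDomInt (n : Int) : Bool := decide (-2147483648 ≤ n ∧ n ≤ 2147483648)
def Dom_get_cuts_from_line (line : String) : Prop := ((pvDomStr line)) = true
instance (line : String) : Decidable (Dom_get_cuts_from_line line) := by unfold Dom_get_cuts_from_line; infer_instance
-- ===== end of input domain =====

-- B replaces A's fused four-variable index loop by a last-index helper called once per label (objective: simpler).

-- ===== PORT A =====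
-- Literal port of A: split on ",", loop i over range(0, len), overwrite the four slots.
-- (A's 'cut_positions = {}' is dead local state with no effect on the result and is not carried.)
def get_cuts_from_line (line : String) : Int × Int × Int × Int :=
  let linechars := (PySem.Chars.splitOn line.toList ",".toList).map (fun cs => String.ofList cs)
  (PySem.List.pyRange 0 (linechars.length : Int) 1).foldl
    (fun (st : Int × Int × Int × Int) i =>
      let c := PySem.List.pyGetD linechars i ""
      let st := if c = "DR5" then (i, st.2.1, st.2.2.1, st.2.2.2) else st
      let st := if c = "DC5" then (st.1, i, st.2.2.1, st.2.2.2) else st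
      let st := if c = "DC3" then (st.1, st.2.1, i, st.2.2.2) else st
      if c = "DR3" then (st.1, st.2.1, st.2.2.1, i) else st)
    (-1, -1, -1, -1)

-- ===== PORT B =====
-- B-side helper: last index of target in labels, -1 if absent (enumerate + overwrite).
def lastIndex (labels : List String) (target : String) : Int :=
  (PySem.List.enumerate labels 0).foldl
    (fun (idx : Int) (p : Int × String) => if p.2 = target then p.1 else idx) (-1)

def get_cuts_from_line_alt (line : String) : Int × Int × Int × Int :=
  let labels := (PySem.Chars.splitOn line.toList ",".toList).map (fun cs => String.ofList cs)
  (lastIndex labels "DR5", lastIndex labels "DC5", lastIndex labels "DC3", lastIndex labels "DR3")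

-- ===== PRECONDITION & SPEC =====
def Spec_get_cuts_from_line (line : String) (out : Int × Int × Int × Int) : Prop := out = get_cuts_from_line_alt line
instance (line : String) (out : Int × Int × Int × Int) : Decidable (Spec_get_cuts_from_line line out) := by unfold Spec_get_cuts_from_line; infer_instance

-- ===== CLAIM (what is proved, stated in full; the proofs are below) =====
def Claim_equal_get_cuts_from_line : Prop := ∀ (line : String), Dom_get_cuts_from_line line → Spec_get_cuts_from_line line (get_cuts_from_line line)

-- ===== LEMMAS AND PROOFS =====

-- A's fused pass over (index, label) pairs computes, componentwise, B's four separate last-index scans.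
lemma fused_eq_componentwise (labels : List String) : ∀ (s : Int) (st : Int × Int × Int × Int),
    (PySem.List.enumerate labels s).foldl
      (fun (st : Int × Int × Int × Int) (p : Int × String) =>
        let st := if p.2 = "DR5" then (p.1, st.2.1, st.2.2.1, st.2.2.2) else st
        let st := if p.2 = "DC5" then (st.1, p.1, st.2.2.1, st.2.2.2) else st
        let st := if p.2 = "DC3" then (st.1, st.2.1, p.1, st.2.2.2) else st
        if p.2 = "DR3" then (st.1, st.2.1, st.2.2.1, p.1) else st) st
    = ((PySem.List.enumerate labels s).foldl (fun idx p => if p.2 = "DR5" then p.1 else idx) st.1,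
       (PySem.List.enumerate labels s).foldl (fun idx p => if p.2 = "DC5" then p.1 else idx) st.2.1,
       (PySem.List.enumerate labels s).foldl (fun idx p => if p.2 = "DC3" then p.1 else idx) st.2.2.1,
       (PySem.List.enumerate labels s).foldl (fun idx p => if p.2 = "DR3" then p.1 else idx) st.2.2.2) := by
  induction labels with
  | nil => intro s st; simp [PySem.List.enumerate_nil]
  | cons x xs ih =>
    intro s st
    rw [PySem.List.enumerate_cons]
    simp only [List.foldl_cons]
    rw [ih]
    split_ifs <;> rfl

theorem get_cuts_from_line_eq (line : String) : get_cuts_from_line line = get_cuts_from_line_alt line := by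
  unfold get_cuts_from_line get_cuts_from_line_alt lastIndex
  generalize (PySem.Chars.splitOn line.toList ",".toList).map (fun cs => String.ofList cs) = labels
  have h : (PySem.List.pyRange 0 (labels.length : Int) 1).foldl
      (fun (st : Int × Int × Int × Int) i =>
        let c := PySem.List.pyGetD labels i ""
        let st := if c = "DR5" then (i, st.2.1, st.2.2.1, st.2.2.2) else st
        let st := if c = "DC5" then (st.1, i, st.2.2.1, st.2.2.2) else st
        let st := if c = "DC3" then (st.1, st.2.1, i, st.2.2.2) else st
        if c = "DR3" then (st.1, st.2.1, st.2.2.1, i) else st)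
      ((-1 : Int), (-1 : Int), (-1 : Int), (-1 : Int))
      = (PySem.List.enumerate labels 0).foldl
      (fun (st : Int × Int × Int × Int) (p : Int × String) =>
        let st := if p.2 = "DR5" then (p.1, st.2.1, st.2.2.1, st.2.2.2) else st
        let st := if p.2 = "DC5" then (st.1, p.1, st.2.2.1, st.2.2.2) else st
        let st := if p.2 = "DC3" then (st.1, st.2.1, p.1, st.2.2.2) else st
        if p.2 = "DR3" then (st.1, st.2.1, st.2.2.1, p.1) else st)
      ((-1 : Int), (-1 : Int), (-1 : Int), (-1 : Int)) := by
    rw [PySem.List.enumerate_eq_map_pyRange (d := ""), List.foldl_map]; rfl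
  rw [h, fused_eq_componentwise]

-- ===== VERDICT (by name: the statement is the Claim_ definition above) =====
theorem get_cuts_from_line_spec : Claim_equal_get_cuts_from_line := by
  intro line _
  unfold Spec_get_cuts_from_line
  exact get_cuts_from_line_eq line
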